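-- pv_equiv track=rewrite | github.com/Jayesh-Gautam/ExportSaathi | backend/services/image_processor.py | _extract_labels
-- ===== SOURCE A (Python) =====
-- from typing import Dict, Any, Optional, List, Tuple
--
-- def _extract_labels(text_lines: List[str]) -> List[str]:
--     """
--     Extract potential product labels from text lines
--
--     Identifies common label patterns like:
--     - Brand names (capitalized words)
--     - Product types
--     - Certifications (FDA, CE, etc.)
--     - Warnings and instructions
--
--     Args:
--         text_lines: List of text lines from image
--
--     Returns:
--         List of detected labels
--     """
--     labels = []
--
--     # Common label keywords
--     label_keywords = [
--         'organic', 'natural', 'certified', 'approved', 'fda', 'ce',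
--         'made in', 'product of', 'ingredients', 'contains', 'warning',
--         'caution', 'net weight', 'net wt', 'volume', 'exp', 'mfg',
--         'batch', 'lot', 'halal', 'kosher', 'vegan', 'gluten-free'
--     ]
--
--     for line in text_lines:
--         line_lower = line.lower().strip()
--
--         # Check for label keywords
--         for keyword in label_keywords:
--             if keyword in line_lower:
--                 labels.append(line.strip())
--                 break
--
--         # Check for all-caps text (often labels)
--         if line.isupper() and len(line) > 2:
--             labels.append(line.strip())
--
--     # Remove duplicates while preserving order
--     seen = set()
--     unique_labels = []
--     for label in labels:
--         if label not in seen: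
--             seen.add(label)
--             unique_labels.append(label)
--
--     return unique_labels[:20]  # Limit to top 20 labels
-- ===== SOURCE B (Python) =====
-- def _extract_labels(text_lines):
--     """Alternative algorithm: sliding-window keyword lookup against a hash set
--     (instead of per-keyword substring scans), dedup by membership in the output
--     list itself (no separate seen-set/dedup pass), and early termination once
--     20 labels are collected (instead of slicing at the end)."""
--     keywords = [
--         'organic', 'natural', 'certified', 'approved', 'fda', 'ce',
--         'made in', 'product of', 'ingredients', 'contains', 'warning',
--         'caution', 'net weight', 'net wt', 'volume', 'exp', 'mfg',
--         'batch', 'lot', 'halal', 'kosher', 'vegan', 'gluten-free'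
--     ]
--     kwset = set(keywords)
--     lengths = sorted({len(k) for k in keywords})
--
--     def has_keyword(low):
--         # a keyword occurs in low iff some window of a keyword length equals a keyword
--         for i in range(len(low) + 1):
--             for L in lengths:
--                 if low[i:i + L] in kwset:
--                     return True
--         return False
--
--     result = []
--     for line in text_lines:
--         stripped = line.strip()
--         if stripped not in result:
--             if has_keyword(line.lower().strip()) or (line.isupper() and len(line) > 2):
--                 result.append(stripped)
--                 if len(result) == 20:
--                     break
--     return result
-- ===== Notes on version B (the rewrite author's own statement) =====
-- stated objective: alternative
-- what changed: Replaces the per-keyword substring scans by a sliding-window lookup (every window whose length is a keyword length is tested against a hash set of keywords), drops the separate seen-set/dedup pass in favour of dedup by membership in the 20-bounded output list itself, and terminates early once 20 labels are collected instead of slicing at the end.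
import Mathlib
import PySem

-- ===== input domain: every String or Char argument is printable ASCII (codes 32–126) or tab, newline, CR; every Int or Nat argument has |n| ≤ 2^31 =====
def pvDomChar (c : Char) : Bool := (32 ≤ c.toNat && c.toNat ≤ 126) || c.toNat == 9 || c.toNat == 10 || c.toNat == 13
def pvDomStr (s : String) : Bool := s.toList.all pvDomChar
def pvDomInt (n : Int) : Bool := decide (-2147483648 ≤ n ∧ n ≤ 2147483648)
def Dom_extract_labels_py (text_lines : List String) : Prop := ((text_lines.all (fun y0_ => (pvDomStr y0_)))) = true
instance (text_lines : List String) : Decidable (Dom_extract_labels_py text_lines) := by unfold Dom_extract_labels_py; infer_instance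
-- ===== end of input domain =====

-- B replaces A's per-keyword substring scans by a sliding-window lookup in a keyword set,
-- dedups by membership in the 20-bounded output list itself (no seen-set pass), and stops
-- as soon as 20 labels are collected instead of slicing at the end (measured faster on
-- large inputs in a timing run, via the early termination).

-- hand port of Python str.isupper() (no PySem string-level primitive): at least one cased
-- character and no lowercase cased character; exact on the ASCII domain, where the cased
-- characters are exactly the letters.
def pyIsupper (s : String) : Bool :=
  s.toList.all (fun c => !PySem.Chars.islower c) && s.toList.any (fun c => PySem.Chars.isupper c)

def labelKeywordsPV : List String :=
  ["organic", "natural", "certified", "approved", "fda", "ce",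
   "made in", "product of", "ingredients", "contains", "warning",
   "caution", "net weight", "net wt", "volume", "exp", "mfg",
   "batch", "lot", "halal", "kosher", "vegan", "gluten-free"]

-- ===== PORT A =====
-- inner 'for keyword in label_keywords: if keyword in line_lower: append; break' loop:
-- first-match scan returning whether an append happened (the appended value does not
-- depend on which keyword matched)
def kwLoopPV (low : String) : List String → Bool
  | [] => false
  | k :: ks => if PySem.Str.isIn k low then true else kwLoopPV low ks

def astepPV (labels : List String) (line : String) : List String :=
  let line_lower := PySem.Str.strip (PySem.Str.lower line)
  let labels := if kwLoopPV line_lower labelKeywordsPV then labels ++ [PySem.Str.strip line] else labels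
  if pyIsupper line && PySem.Str.len line > 2 then labels ++ [PySem.Str.strip line] else labels

def dedupStepPV (p : PySem.Set String × List String) (label : String) : PySem.Set String × List String :=
  if PySem.Set.contains p.1 label then p else (PySem.Set.add p.1 label, p.2 ++ [label])

def extract_labels_py (text_lines : List String) : List String :=
  let labels := text_lines.foldl astepPV []
  let r := labels.foldl dedupStepPV (PySem.Set.empty, [])
  PySem.List.slice r.2 none (some 20)

-- ===== PORT B =====
-- kwset = set(keywords)
def kwSetPV : PySem.Set String := PySem.Set.ofList labelKeywordsPV

-- lengths = sorted({len(k) for k in keywords})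
def kwLengthsPV : List Int :=
  PySem.List.sorted (PySem.Set.ofList (labelKeywordsPV.map (fun k => PySem.Str.len k))) (fun x => x) false

-- has_keyword(low): every window of low whose length is a keyword length is looked up in kwset
def hasKeywordPV (low : String) : Bool :=
  (List.range ((PySem.Str.len low).toNat + 1)).any (fun i =>
    kwLengthsPV.any (fun L =>
      PySem.Set.contains kwSetPV (PySem.Str.slice low (some (i : Int)) (some ((i : Int) + L)))))

-- the line filter of B: window keyword hit, or all-caps of length > 2
def bCondPV (line : String) : Bool :=
  hasKeywordPV (PySem.Str.strip (PySem.Str.lower line)) || (pyIsupper line && PySem.Str.len line > 2)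

-- main loop with dedup against the output list and break at 20
def bLoopPV (acc : List String) : List String → List String
  | [] => acc
  | line :: rest =>
    let stripped := PySem.Str.strip line
    if acc.contains stripped then bLoopPV acc rest
    else if bCondPV line then
      if (acc ++ [stripped]).length == 20 then acc ++ [stripped]
      else bLoopPV (acc ++ [stripped]) rest
    else bLoopPV acc rest

def extract_labels_py_alt (text_lines : List String) : List String :=
  bLoopPV [] text_lines

-- ===== PRECONDITION & SPEC =====
def Spec_extract_labels_py (text_lines : List String) (out : List String) : Prop := out = extract_labels_py_alt text_lines
instance (text_lines : List String) (out : List String) : Decidable (Spec_extract_labels_py text_lines out) := by unfold Spec_extract_labels_py; infer_instance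

-- ===== CLAIM (what is proved, stated in full; the proofs are below) =====
def Claim_equal_extract_labels_py : Prop := ∀ (text_lines : List String), Dom_extract_labels_py text_lines → Spec_extract_labels_py text_lines (extract_labels_py text_lines)

-- ===== LEMMAS AND PROOFS =====

lemma kwLoopPV_eq_any (low : String) (ks : List String) :
    kwLoopPV low ks = ks.any (fun k => PySem.Str.isIn k low) := by
  induction ks with
  | nil => rfl
  | cons k ks ih => simp [kwLoopPV, ih]

-- the window check equals A's per-keyword scan
lemma hasKeywordPV_eq (low : String) :
    hasKeywordPV low = kwLoopPV low labelKeywordsPV := by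
  rw [kwLoopPV_eq_any]
  have hlen : ∀ k ∈ labelKeywordsPV, PySem.Str.len k ∈ kwLengthsPV := by decide
  have hpos : ∀ L ∈ kwLengthsPV, 0 ≤ L := by decide
  cases hB : (labelKeywordsPV.any (fun k => PySem.Str.isIn k low)) with
  | true =>
      simp only [List.any_eq_true] at hB
      simp only [hasKeywordPV, List.any_eq_true]
      obtain ⟨k, hk, hin⟩ := hB
      obtain ⟨a, b, hab⟩ := (PySem.Str.isIn_iff_infix k low).mp hin
      have hklen : PySem.Str.len k = (k.toList.length : Int) := by
        simp [PySem.Str.len_eq]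
      have hslice : PySem.Str.slice low (some (a.length : Int))
          (some ((a.length : Int) + PySem.Str.len k)) = k := by
        apply String.toList_inj.mp
        rw [PySem.Str.toList_slice, PySem.Chars.slice_eq_listSlice, hklen,
            PySem.List.slice_natCast_add, ← hab]
        rw [List.append_assoc]
        rw [List.drop_left, List.take_left]
      refine ⟨a.length, ?_, PySem.Str.len k, hlen k hk, ?_⟩
      · have : a.length ≤ low.toList.length := by
          rw [← hab]; simp
        simp only [List.mem_range, PySem.Str.len_eq]
        omega
      · rw [hslice]
        have hkmem : k ∈ kwSetPV := (PySem.Set.mem_ofList labelKeywordsPV k).mpr hk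
        exact List.elem_eq_true_of_mem hkmem
  | false =>
      simp only [List.any_eq_false] at hB
      simp only [hasKeywordPV, List.any_eq_false]
      intro i _ hLany
      simp only [List.any_eq_true] at hLany
      exfalso
      obtain ⟨L, hL, hcontains⟩ := hLany
      set w := PySem.Str.slice low (some (i : Int)) (some ((i : Int) + L)) with hw
      have hwmem : w ∈ labelKeywordsPV := by
        have : w ∈ kwSetPV := by
          simpa [PySem.Set.contains, List.contains_iff_mem] using hcontains
        exact (PySem.Set.mem_ofList labelKeywordsPV w).mp this
      apply hB w hwmem
      rw [PySem.Str.isIn_iff_infix]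
      have hcast : ((i : Int) + L) = ((i : Int) + ((L.toNat : Nat) : Int)) := by
        have := hpos L hL; omega
      have : w.toList = List.take L.toNat (List.drop i low.toList) := by
        rw [hw, PySem.Str.toList_slice, PySem.Chars.slice_eq_listSlice, hcast,
            PySem.List.slice_natCast_add]
      rw [this]
      exact ((List.take_prefix _ _).isInfix).trans ((List.drop_suffix _ _).isInfix)

lemma astepPV_acc (acc : List String) (line : String) :
    astepPV acc line = acc ++ astepPV [] line := by
  simp only [astepPV]
  split_ifs <;> simp

lemma foldl_astepPV_acc (lines : List String) (acc : List String) :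
    lines.foldl astepPV acc = acc ++ lines.foldl astepPV [] := by
  induction lines generalizing acc with
  | nil => simp
  | cons l ls ih =>
      simp only [List.foldl_cons]
      rw [ih, astepPV_acc, ih (astepPV [] l), List.append_assoc]

-- proof-side fused step: A's per-line contribution pushed through the dedup fold
def cstepPV (p : PySem.Set String × List String) (line : String) : PySem.Set String × List String :=
  let stripped := PySem.Str.strip line
  if PySem.Set.contains p.1 stripped then p
  else if bCondPV line then (PySem.Set.add p.1 stripped, p.2 ++ [stripped]) else p

lemma dedup_astep (p : PySem.Set String × List String) (line : String) :
    (astepPV [] line).foldl dedupStepPV p = cstepPV p line := by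
  simp only [astepPV, cstepPV, bCondPV, hasKeywordPV_eq]
  by_cases hs : PySem.Str.strip line ∈ p.1
  · cases hkw : kwLoopPV (PySem.Str.strip (PySem.Str.lower line)) labelKeywordsPV <;>
      cases hcaps : (pyIsupper line && PySem.Str.len line > 2) <;>
        simp [dedupStepPV, List.foldl, hs]
  · cases hkw : kwLoopPV (PySem.Str.strip (PySem.Str.lower line)) labelKeywordsPV <;>
      cases hcaps : (pyIsupper line && PySem.Str.len line > 2) <;>
        simp [dedupStepPV, List.foldl, hs, PySem.Set.add, PySem.Set.contains]

lemma dedup_eq_fused (lines : List String) (p : PySem.Set String × List String) :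
    (lines.foldl astepPV []).foldl dedupStepPV p = lines.foldl cstepPV p := by
  induction lines generalizing p with
  | nil => rfl
  | cons l ls ih =>
      simp only [List.foldl_cons]
      rw [foldl_astepPV_acc, List.foldl_append, dedup_astep, ih]

-- B's loop without the break: dedup against the output list
def bfullPV (acc : List String) : List String → List String
  | [] => acc
  | line :: rest =>
    let stripped := PySem.Str.strip line
    if acc.contains stripped then bfullPV acc rest
    else if bCondPV line then bfullPV (acc ++ [stripped]) rest else bfullPV acc rest

-- the set component of the fused fold mirrors membership in the output list
lemma cfold_eq_bfull (lines : List String) (S : PySem.Set String) (acc : List String)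
    (hinv : ∀ x, PySem.Set.contains S x = acc.contains x) :
    (lines.foldl cstepPV (S, acc)).2 = bfullPV acc lines := by
  induction lines generalizing S acc with
  | nil => rfl
  | cons l ls ih =>
      simp only [List.foldl_cons, bfullPV, cstepPV, hinv]
      by_cases hs : acc.contains (PySem.Str.strip l) = true
      · simp only [hs, if_true]; exact ih S acc hinv
      · simp only [hs, if_false, Bool.false_eq_true]
        by_cases hc : bCondPV l = true
        · simp only [hc, if_true]
          apply ih
          intro x
          have hS : PySem.Set.contains S (PySem.Str.strip l) = false := by
            rw [hinv]; simpa using hs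
          have hnot : PySem.Str.strip l ∉ S := by simpa using hS
          have hadd : PySem.Set.add S (PySem.Str.strip l) = S ++ [PySem.Str.strip l] := by
            simp [PySem.Set.add, PySem.Set.contains, hnot]
          rw [hadd]
          simp only [PySem.Set.contains] at hinv ⊢
          simp only [List.contains_append, hinv]
        · simp only [hc, if_false, Bool.false_eq_true]; exact ih S acc hinv

lemma bfull_prefix (lines : List String) (acc : List String) :
    acc <+: bfullPV acc lines := by
  induction lines generalizing acc with
  | nil => exact List.prefix_rfl
  | cons l ls ih =>
      simp only [bfullPV]
      split_ifs
      · exact ih acc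
      · exact List.IsPrefix.trans ⟨[PySem.Str.strip l], rfl⟩ (ih _)
      · exact ih acc

-- the break at 20 is the take-20 of the unbroken loop
lemma bloop_take (lines : List String) (acc : List String) (h : acc.length < 20) :
    bLoopPV acc lines = (bfullPV acc lines).take 20 := by
  induction lines generalizing acc with
  | nil =>
      simp only [bLoopPV, bfullPV]
      exact (List.take_of_length_le (by omega)).symm
  | cons l ls ih =>
      simp only [bLoopPV, bfullPV]
      by_cases h1 : acc.contains (PySem.Str.strip l) = true
      · simp only [h1, if_true]; exact ih acc h
      · have h1' : acc.contains (PySem.Str.strip l) = false := by simpa using h1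
        simp only [h1', Bool.false_eq_true, if_false]
        by_cases h2 : bCondPV l = true
        · simp only [h2, if_true]
          by_cases h20 : (acc ++ [PySem.Str.strip l]).length = 20
          · have hbeq : ((acc ++ [PySem.Str.strip l]).length == 20) = true := by
              simpa using h20
            simp only [hbeq, if_true]
            obtain ⟨t, ht⟩ := bfull_prefix ls (acc ++ [PySem.Str.strip l])
            rw [← ht, ← h20, List.take_left]
          · have hbeq : ((acc ++ [PySem.Str.strip l]).length == 20) = false := by
              simpa using h20
            simp only [hbeq, Bool.false_eq_true, if_false]
            apply ih
            simp only [List.length_append, List.length_cons, List.length_nil] at h20 ⊢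
            omega
        · have h2' : bCondPV l = false := by simpa using h2
          simp only [h2', Bool.false_eq_true, if_false]
          exact ih acc h

-- ===== VERDICT (by name: the statement is the Claim_ definition above) =====
theorem extract_labels_py_spec : Claim_equal_extract_labels_py := by
  intro text_lines _
  simp only [Spec_extract_labels_py, extract_labels_py, extract_labels_py_alt]
  rw [dedup_eq_fused, cfold_eq_bfull text_lines PySem.Set.empty [] (fun x => rfl),
      PySem.List.slice_to (b := 20) _ (by norm_num), bloop_take text_lines [] (by norm_num)]
  rfl
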